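-- pv_equiv track=rewrite | github.com/davea42/searchgnucash | searchgnucash.py | badfield
-- ===== SOURCE A (Python) =====
-- def badfield(f):
--     newlinecount = 0
--     res = False
--     for c in f:
--         if c == "\n":
--             newlinecount = int(newlinecount) + 1
--         v = ord(c)
--         if v < 32:
--             res = True
--         elif v > 126:
--             res = True
--         continue
--     return (res, newlinecount)
-- ===== SOURCE B (Python) =====
-- def badfield(f):
--     # Build a frequency table once; badness is a property of the distinct
--     # characters, and the newline count is just the table entry for "\n".
--     freq = {}
--     for c in f:
--         freq[c] = freq.get(c, 0) + 1
--     bad = any(ord(c) < 32 or ord(c) > 126 for c in freq)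
--     return (bad, freq.get("\n", 0))
-- ===== Notes on version B (the rewrite author's own statement) =====
-- stated objective: alternative
-- what changed: Builds a character-frequency dictionary in one pass, then decides badness over the distinct keys only and reads the newline count from that table, instead of A's fused loop that updates a flag and a counter per character.
import Mathlib
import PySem

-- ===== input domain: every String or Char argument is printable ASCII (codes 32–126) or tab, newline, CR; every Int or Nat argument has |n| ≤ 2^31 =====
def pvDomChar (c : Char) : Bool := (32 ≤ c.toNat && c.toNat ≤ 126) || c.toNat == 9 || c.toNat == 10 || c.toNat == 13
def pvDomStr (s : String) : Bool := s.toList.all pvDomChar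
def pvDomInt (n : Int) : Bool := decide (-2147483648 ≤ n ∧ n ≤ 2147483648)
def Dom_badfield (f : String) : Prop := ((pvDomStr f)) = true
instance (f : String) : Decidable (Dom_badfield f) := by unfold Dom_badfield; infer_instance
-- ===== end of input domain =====

-- B builds a character-frequency dictionary once, decides badness over the distinct keys
-- and reads the newline count from the table (objective: alternative algorithm).

-- ===== PORT A =====
-- A's single loop carrying (res, newlinecount); branches in source order.
def badfield (f : String) : Bool × Int :=
  let st := f.toList.foldl (fun (st : Bool × Int) c =>
    let newlinecount : Int := if c == '\n' then st.2 + 1 else st.2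
    let res : Bool := if c.toNat < 32 then true else if c.toNat > 126 then true else st.1
    (res, newlinecount)) (false, 0)
  (st.1, st.2)

-- ===== PORT B =====
-- freq[c] = freq.get(c, 0) + 1 over f; then any() over the keys; then freq.get("\n", 0).
def badfield_alt (f : String) : Bool × Int :=
  let freq := f.toList.foldl (fun (d : PySem.Dict Char Int) c => d.insert c (d.getD c 0 + 1))
    PySem.Dict.empty
  let bad := freq.keys.any (fun c => decide (c.toNat < 32) || decide (c.toNat > 126))
  (bad, freq.getD '\n' 0)

-- ===== PRECONDITION & SPEC =====
def Spec_badfield (f : String) (out : Bool × Int) : Prop := out = badfield_alt f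
instance (f : String) (out : Bool × Int) : Decidable (Spec_badfield f out) := by unfold Spec_badfield; infer_instance

-- ===== CLAIM (what is proved, stated in full; the proofs are below) =====
def Claim_equal_badfield : Prop := ∀ (f : String), Dom_badfield f → Spec_badfield f (badfield f)

-- ===== LEMMAS AND PROOFS =====

-- A's loop computes (any bad char, newline count)
theorem foldl_pair (l : List Char) : ∀ (r : Bool) (n : Int),
    l.foldl (fun (st : Bool × Int) c =>
      let newlinecount : Int := if c == '\n' then st.2 + 1 else st.2
      let res : Bool := if c.toNat < 32 then true else if c.toNat > 126 then true else st.1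
      (res, newlinecount)) (r, n)
    = (r || l.any (fun c => decide (c.toNat < 32) || decide (c.toNat > 126)),
       n + (l.count '\n' : Int)) := by
  induction l with
  | nil => intro r n; simp
  | cons h t ih =>
    intro r n
    simp only [List.foldl_cons, List.any_cons, List.count_cons, ih]
    by_cases h1 : h.toNat < 32 <;> by_cases h2 : h.toNat > 126 <;>
      by_cases h3 : h = '\n' <;> simp [h1, h2, h3] <;> omega

-- any over the deduplicated key list equals any over the original list
theorem any_ofList (l : List Char) (p : Char → Bool) :
    (PySem.Set.ofList l).any p = l.any p := by
  rw [Bool.eq_iff_iff]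
  simp only [List.any_eq_true, PySem.Set.mem_ofList]

-- ===== VERDICT (by name: the statement is the Claim_ definition above) =====
theorem badfield_spec : Claim_equal_badfield := by
  intro f _
  show badfield f = badfield_alt f
  unfold badfield badfield_alt
  rw [foldl_pair, PySem.Dict.foldl_insert_getD_add_one_eq_counter]
  simp only [PySem.Dict.keys_counter, any_ofList]
  rw [show (PySem.Dict.counter f.toList).getD '\n' 0 = (f.toList.count '\n' : Int) from
    PySem.Dict.getD_counter _ _]
  simp
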